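-- pv_equiv track=rewrite | github.com/hahyuning/Coding-test-study | test/카카오/2022 recruitment/q4.py | solution
-- ===== SOURCE A (Python) =====
-- def solution(n, info):
--     result = []
--
--     def check(idx, cnt, res1, res2):
--         if sum(cnt) > n:
--             return
--
--         if idx == 11:
--             if sum(cnt) == n:
--                 if res1 > res2:
--                     result.append([res1 - res2, cnt])
--             return
--
--         for i in range(n + 1):
--             tmp = cnt[:]
--             tmp[idx] = i
--
--             if i == 0 and info[idx] == 0:
--                 check(idx + 1, tmp, res1, res2)
--                 continue
--
--             if i > info[idx]:
--                 check(idx + 1, tmp, res1 + 10 - idx, res2)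
--             else:
--                 check(idx + 1, tmp, res1, res2 + 10 - idx)
--
--     check(0, [0] * 11, 0, 0)
--
--     if not result:
--         return [-1]
--
--     result.sort(key=lambda x:(-x[0], x[1]))
--     return result[0][1]
-- ===== SOURCE B (Python) =====
-- def fill(info, mask, k, left):
--     # Lexicographically smallest arrow counts for the last k targets, given the
--     # win-set `mask`: leftover arrows are absorbed as far to the back as possible.
--     if k == 0:
--         return [], left
--     suf, l = fill(info, mask, k - 1, left)
--     idx = 11 - k
--     if mask >> idx & 1:
--         return [info[idx] + 1 + l] + suf, 0
--     take = min(l, info[idx])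
--     return [take] + suf, l - take
--
--
-- def solution(n, info):
--     if n <= 0:
--         return [-1]  # without arrows the lion cannot outscore the apprentice
--     best = None  # (score margin, arrow counts)
--     for mask in range(1 << 11):
--         win = [idx for idx in range(11) if mask >> idx & 1]
--         lose = [idx for idx in range(11) if not mask >> idx & 1]
--         diff = sum(10 - idx for idx in win) - sum(10 - idx for idx in lose if info[idx] > 0)
--         needed = sum(info[idx] + 1 for idx in win)
--         if diff <= 0 or needed > n:
--             continue
--         cnt, _ = fill(info, mask, 11, n - needed)
--         if best is None or diff > best[0] or (diff == best[0] and cnt < best[1]):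
--             best = (diff, cnt)
--     return best[1] if best is not None else [-1]
-- ===== Notes on version B (the rewrite author's own statement) =====
-- stated objective: alternative
-- what changed: A recursively enumerates every distribution of n arrows over the 11 targets (pruned (n+1)^11 search), collects all winning outcomes and sorts them; B enumerates the 2^11 possible sets of targets the lion can win, computes each set's fixed score margin and minimal arrow requirement, builds the lexicographically smallest arrow assignment by pushing leftover arrows to the back, and keeps the best (max margin, lex-smallest counts) candidate in one pass (asymptotically a smaller search space, though a timing run's large inputs lie outside Pre_, so no speed is claimed); …
import Mathlib
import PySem

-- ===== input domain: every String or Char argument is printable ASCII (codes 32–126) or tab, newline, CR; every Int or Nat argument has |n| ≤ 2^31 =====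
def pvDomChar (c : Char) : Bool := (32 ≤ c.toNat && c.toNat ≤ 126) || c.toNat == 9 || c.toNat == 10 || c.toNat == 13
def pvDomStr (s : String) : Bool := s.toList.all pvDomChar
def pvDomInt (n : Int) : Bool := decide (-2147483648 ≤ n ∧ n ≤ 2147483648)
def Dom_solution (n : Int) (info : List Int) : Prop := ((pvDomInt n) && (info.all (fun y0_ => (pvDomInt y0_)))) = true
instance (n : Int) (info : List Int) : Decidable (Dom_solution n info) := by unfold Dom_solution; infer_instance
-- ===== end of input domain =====

-- B replaces A's exhaustive recursion over all arrow distributions by an enumeration of the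
-- 2^11 possible win-sets, building for each the lexicographically smallest arrow assignment.

-- ===== PORT A =====
-- literal transliteration of A's recursive `check`; the accumulated `result` list is its return value.
-- The `11 < idx` branch is unreachable (Python's idx only takes values 0..11); it only serves termination.
def checkA (n : Int) (info : List Int) (idx : Nat) (cnt : List Int) (res1 res2 : Int) :
    List (Int × List Int) :=
  if cnt.sum > n then []
  else if idx = 11 then
    (if cnt.sum = n then (if res1 > res2 then [(res1 - res2, cnt)] else []) else [])
  else if 11 < idx then []
  else
    (PySem.List.pyRange 0 (n + 1) 1).flatMap (fun i =>
      let tmp := cnt.set idx i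
      if i = 0 ∧ (PySem.List.pyGet? info (idx : Int)).getD 0 = 0 then
        checkA n info (idx + 1) tmp res1 res2
      else if (PySem.List.pyGet? info (idx : Int)).getD 0 < i then
        checkA n info (idx + 1) tmp (res1 + 10 - (idx : Int)) res2
      else
        checkA n info (idx + 1) tmp res1 (res2 + 10 - (idx : Int)))
  termination_by 12 - idx
  decreasing_by all_goals omega

def solution (n : Int) (info : List Int) : List Int :=
  let result := checkA n info 0 (List.replicate 11 0) 0 0
  if result = [] then [-1]
  else ((PySem.List.sorted2 result (fun x => -x.1) (fun x => x.2)).headD (0, [])).2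

-- ===== PORT B =====
-- transliteration of Source B's `fill`: arrow counts for the last k targets plus unplaced leftover
def fillB (info : List Int) (mask : Nat) : Nat → Int → List Int × Int
  | 0, left => ([], left)
  | k + 1, left =>
    let p := fillB info mask k left
    let idx := 11 - (k + 1)
    if (mask >>> idx) &&& 1 == 1 then
      (((PySem.List.pyGet? info (idx : Int)).getD 0 + 1 + p.2) :: p.1, 0)
    else
      let take := min p.2 ((PySem.List.pyGet? info (idx : Int)).getD 0)
      (take :: p.1, p.2 - take)

-- the body of Source B's `for mask in range(1 << 11)` loop (Python's nonnegative ints as Nat)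
def stepB (n : Int) (info : List Int) (best : Option (Int × List Int)) (mask : Nat) :
    Option (Int × List Int) :=
  let win : List Nat := (List.range 11).filter (fun idx => (mask >>> idx) &&& 1 == 1)
  let lose : List Nat := (List.range 11).filter (fun idx => !((mask >>> idx) &&& 1 == 1))
  let diff := (win.map (fun (idx : Nat) => (10 : Int) - (idx : Int))).sum
    - ((lose.filter (fun (idx : Nat) => 0 < (PySem.List.pyGet? info (idx : Int)).getD 0)).map
        (fun (idx : Nat) => (10 : Int) - (idx : Int))).sum
  let needed := (win.map (fun (idx : Nat) => (PySem.List.pyGet? info (idx : Int)).getD 0 + 1)).sum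
  if diff ≤ 0 ∨ needed > n then best
  else
    let cnt := (fillB info mask 11 (n - needed)).1
    match best with
    | none => some (diff, cnt)
    | some b => if b.1 < diff ∨ (diff = b.1 ∧ cnt < b.2) then some (diff, cnt) else best

def solution_alt (n : Int) (info : List Int) : List Int :=
  if n ≤ 0 then [-1]
  else
    match (List.range 2048).foldl (stepB n info) none with
    | some b => b.2
    | none => [-1]

-- ===== PRECONDITION & SPEC =====
-- Pre_ restricts to the archery problem's natural domain: for n ≥ 0 it requires at least
-- 11 targets (A raises IndexError on shorter lists) with nonnegative arrow counts in
-- info[0..10] (negative arrow counts are meaningless for this task; B's subset enumeration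
-- assumes them ≥ 0); for n < 0 both programs return [-1] without reading info.
def Pre_solution (n : Int) (info : List Int) : Prop :=
  n < 0 ∨ (11 ≤ info.length ∧ ∀ x ∈ info.take 11, 0 ≤ x)
instance (n : Int) (info : List Int) : Decidable (Pre_solution n info) := by
  unfold Pre_solution; infer_instance

def pvWitness_solution : Int × List Int := (5, [2, 1, 1, 1, 0, 0, 0, 0, 0, 0, 0])

def Spec_solution (n : Int) (info : List Int) (out : List Int) : Prop := out = solution_alt n info
instance (n : Int) (info : List Int) (out : List Int) : Decidable (Spec_solution n info out) := by
  unfold Spec_solution; infer_instance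

-- ===== CLAIM (what is proved, stated in full; the proofs are below) =====
def Claim_equal_solution : Prop := ∀ (n : Int) (info : List Int), Dom_solution n info →
  Pre_solution n info → Spec_solution n info (solution n info)

-- ===== LEMMAS AND PROOFS =====

-- abbreviation for info[idx] as both ports read it
def gi (info : List Int) (idx : Nat) : Int := (PySem.List.pyGet? info (idx : Int)).getD 0

def wt (idx : Nat) : Int := 10 - (idx : Int)

-- lion's score of a suffix assignment starting at position idx (mirrors A's res1 updates)
def sc1 (info : List Int) : Nat → List Int → Int
  | _, [] => 0
  | idx, i :: s => (if gi info idx < i then wt idx else 0) + sc1 info (idx + 1) s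

-- apprentice's score of a suffix assignment (mirrors A's res2 updates)
def sc2 (info : List Int) : Nat → List Int → Int
  | _, [] => 0
  | idx, i :: s =>
    (if i = 0 ∧ gi info idx = 0 then 0 else if gi info idx < i then 0 else wt idx) +
      sc2 info (idx + 1) s

-- all length-k lists with entries in range(n+1), in A's depth-first (lexicographic) order
def enum (n : Int) : Nat → List (List Int)
  | 0 => [[]]
  | k + 1 => (PySem.List.pyRange 0 (n + 1) 1).flatMap (fun i => (enum n k).map (i :: ·))

def dd (info : List Int) (c : List Int) : Int := sc1 info 0 c - sc2 info 0 c

def Pgood (n : Int) (info : List Int) (c : List Int) : Prop :=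
  c.sum = n ∧ sc2 info 0 c < sc1 info 0 c

-- "x is a strictly better outcome than y": larger margin, or equal margin and lex-smaller counts
abbrev Better (x y : Int × List Int) : Prop := y.1 < x.1 ∨ (x.1 = y.1 ∧ x.2 < y.2)

def betterb (x y : Int × List Int) : Bool :=
  decide (y.1 < x.1) || (decide (x.1 = y.1) && decide (x.2 < y.2))

def bitb (mask idx : Nat) : Bool := (mask >>> idx) &&& 1 == 1

-- nonnegativity of the 11 relevant info entries, as Pre_ provides it
def InfoOk (info : List Int) : Prop := ∀ idx < 11, 0 ≤ gi info idx

def dM (info : List Int) (mask : Nat) : Int :=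
  ((List.range 11).map
    (fun idx => if bitb mask idx then wt idx else if 0 < gi info idx then -(wt idx) else 0)).sum

def needM (info : List Int) (mask : Nat) : Int :=
  ((List.range 11).map (fun idx => if bitb mask idx then gi info idx + 1 else 0)).sum

def Qual (n : Int) (info : List Int) (mask : Nat) : Prop :=
  0 < dM info mask ∧ needM info mask ≤ n

def cand (n : Int) (info : List Int) (mask : Nat) : Int × List Int :=
  (dM info mask, (fillB info mask 11 (n - needM info mask)).1)

-- needed arrows of the last k targets (positions 11-k..10)
def needS (info : List Int) (mask : Nat) : Nat → Int
  | 0 => 0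
  | k + 1 => (if bitb mask (10 - k) then gi info (10 - k) + 1 else 0) + needS info mask k

-- capacity of the last k targets when none of them is won
def capS (info : List Int) (mask : Nat) : Nat → Int
  | 0 => 0
  | k + 1 => gi info (10 - k) + capS info mask k

-- ---------- generic facts ----------

lemma sum_filter_map (l : List Nat) (p : Nat → Bool) (f : Nat → Int) :
    (((l.filter p).map f).sum) = (l.map (fun x => if p x then f x else 0)).sum := by
  induction l with
  | nil => rfl
  | cons a t ih => by_cases h : p a <;> simp [List.filter_cons, h, ih]

lemma sum_nonneg_mem_le (l : List Int) (h : ∀ x ∈ l, 0 ≤ x) : ∀ x ∈ l, x ≤ l.sum := by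
  induction l with
  | nil => simp
  | cons a t ih =>
    intro x hx
    have h1 : 0 ≤ a := h a (by simp)
    have h2 : ∀ y ∈ t, 0 ≤ y := fun y hy => h y (by simp [hy])
    have ht : 0 ≤ t.sum := List.sum_nonneg h2
    rcases List.mem_cons.mp hx with rfl | hx
    · simp; omega
    · have := ih h2 x hx; simp; omega

lemma sum_eq_range_sum (l : List Int) :
    l.sum = ((List.range l.length).map (fun j => l.getD j 0)).sum := by
  induction l with
  | nil => rfl
  | cons a t ih =>
    simp only [List.length_cons, List.range_succ_eq_map, List.map_cons, List.map_map,
      List.sum_cons, Function.comp_def, List.getD_cons_zero, List.getD_cons_succ]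
    rw [ih]

-- ---------- Better: order facts ----------

lemma better_asymm {x y : Int × List Int} (h : Better x y) : ¬ Better y x := by
  rcases h with h | ⟨h1, h2⟩ <;> rintro (h' | ⟨h1', h2'⟩)
  · omega
  · omega
  · omega
  · exact absurd h2 (lt_asymm h2')

lemma better_trans {x y z : Int × List Int} (h1 : Better x y) (h2 : Better y z) : Better x z := by
  rcases h1 with h1 | ⟨h1a, h1b⟩ <;> rcases h2 with h2 | ⟨h2a, h2b⟩
  · exact Or.inl (by omega)
  · exact Or.inl (by omega)
  · exact Or.inl (by omega)
  · exact Or.inr ⟨by omega, lt_trans h1b h2b⟩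

lemma better_total {x y : Int × List Int} (h1 : ¬ Better x y) (h2 : ¬ Better y x) : x = y := by
  unfold Better at h1 h2
  push_neg at h1 h2
  have e1 : x.1 = y.1 := le_antisymm h1.1 h2.1
  have e2 : x.2 = y.2 := le_antisymm (h2.2 e1.symm) (h1.2 e1)
  exact Prod.ext e1 e2

lemma not_better_of_le_of_not {c y p : Int × List Int} (hc1 : c.1 = y.1)
    (hc2 : c.2 = y.2 ∨ c.2 < y.2) (hcp : ¬ Better c p) : ¬ Better y p := by
  rintro (h | ⟨h1, h2⟩)
  · exact hcp (Or.inl (by omega))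
  · rcases hc2 with h' | h'
    · exact hcp (Or.inr ⟨by omega, h' ▸ h2⟩)
    · exact hcp (Or.inr ⟨by omega, lt_trans h' h2⟩)

-- ---------- sorted2 / insertBy: head of A's sort is a minimum ----------

lemma betterb_iff (x y : Int × List Int) : betterb x y = true ↔ Better x y := by
  simp [betterb, Better]

lemma insertBy_pairwise_not (x : Int × List Int) (ys : List (Int × List Int))
    (h : ys.Pairwise (fun a b => ¬ Better b a)) :
    (PySem.List.insertBy (fun a b => betterb a b) x ys).Pairwise
      (fun a b => ¬ Better b a) := by
  induction ys with
  | nil => simp [PySem.List.insertBy]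
  | cons y ys ih =>
    rw [List.pairwise_cons] at h
    by_cases hb : Better x y
    · have hbb : betterb x y = true := (betterb_iff x y).mpr hb
      have he : PySem.List.insertBy (fun a b => betterb a b) x (y :: ys) =
          x :: y :: ys := by simp [PySem.List.insertBy, hbb]
      rw [he, List.pairwise_cons]
      refine ⟨?_, by rw [List.pairwise_cons]; exact h⟩
      intro z hz
      rcases List.mem_cons.mp hz with rfl | hz
      · exact better_asymm hb
      · intro hzx
        exact h.1 z hz (better_trans hzx hb)
    · have hbb : betterb x y = false := by
        rcases hbf : betterb x y with _ | _
        · rfl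
        · exact absurd ((betterb_iff x y).mp hbf) hb
      have he : PySem.List.insertBy (fun a b => betterb a b) x (y :: ys) =
          y :: PySem.List.insertBy (fun a b => betterb a b) x ys := by
        simp [PySem.List.insertBy, hbb]
      rw [he, List.pairwise_cons]
      refine ⟨?_, ih h.2⟩
      intro z hz
      rw [PySem.List.mem_insertBy] at hz
      rcases hz with rfl | hz
      · exact hb
      · exact h.1 z hz

lemma foldl_insertBy_pairwise_not (xs acc : List (Int × List Int))
    (hacc : acc.Pairwise (fun a b => ¬ Better b a)) :
    (xs.foldl (fun acc x => PySem.List.insertBy (fun a b => betterb a b) x acc)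
      acc).Pairwise (fun a b => ¬ Better b a) := by
  induction xs generalizing acc with
  | nil => exact hacc
  | cons x xs ih => exact ih _ (insertBy_pairwise_not x acc hacc)

-- A's comparator equals `Better`
lemma cmp_eq (a b : Int × List Int) :
    (decide (-a.1 < -b.1) || (!decide (-b.1 < -a.1) && decide (a.2 < b.2))) = betterb a b := by
  have e1 : decide (-a.1 < -b.1) = decide (b.1 < a.1) := decide_eq_decide.mpr (by omega)
  have e2 : decide (-b.1 < -a.1) = decide (a.1 < b.1) := decide_eq_decide.mpr (by omega)
  rw [e1, e2]
  show _ = (decide (b.1 < a.1) || (decide (a.1 = b.1) && decide (a.2 < b.2)))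
  by_cases hlt : b.1 < a.1
  · simp [hlt]
  · by_cases heq : a.1 = b.1
    · have h1 : ¬ a.1 < b.1 := by omega
      simp [hlt, heq, h1]
    · have h1 : a.1 < b.1 := by omega
      simp [hlt, heq, h1]

lemma sorted2_eq_foldl (xs : List (Int × List Int)) :
    PySem.List.sorted2 xs (fun x => -x.1) (fun x => x.2) =
      xs.foldl (fun acc x => PySem.List.insertBy (fun a b => betterb a b) x acc) [] := by
  have h : (fun (a b : Int × List Int) =>
      (decide (-a.1 < -b.1) || (!decide (-b.1 < -a.1) && decide (a.2 < b.2)))) =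
      fun a b => betterb a b := by
    funext a b; exact cmp_eq a b
  simp only [PySem.List.sorted2, Bool.false_eq_true, if_false]
  rw [h]

lemma head_sorted2_min (xs : List (Int × List Int)) (h : xs ≠ []) :
    ∃ m t, PySem.List.sorted2 xs (fun x => -x.1) (fun x => x.2) = m :: t ∧ m ∈ xs ∧
      ∀ y ∈ xs, y = m ∨ ¬ Better y m := by
  rw [sorted2_eq_foldl]
  have hperm := PySem.List.foldl_insertBy_perm (fun a b => betterb a b) xs []
  simp only [List.nil_append] at hperm
  have hpw := foldl_insertBy_pairwise_not xs [] (by simp)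
  cases hs : xs.foldl (fun acc x => PySem.List.insertBy (fun a b => betterb a b) x acc) [] with
  | nil =>
    rw [hs] at hperm
    exact absurd (hperm.symm.eq_nil ▸ rfl) h
  | cons m t =>
    rw [hs] at hperm hpw
    rw [List.pairwise_cons] at hpw
    refine ⟨m, t, rfl, hperm.mem_iff.mp (by simp), ?_⟩
    intro y hy
    rcases List.mem_cons.mp (hperm.mem_iff.mpr hy : y ∈ m :: t) with h' | h'
    · exact Or.inl h'
    · exact Or.inr (hpw.1 y h')

-- ---------- A-side: checkA characterization ----------

lemma mem_enum {n : Int} {k : Nat} {s : List Int} :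
    s ∈ enum n k ↔ s.length = k ∧ ∀ x ∈ s, 0 ≤ x ∧ x < n + 1 := by
  induction k generalizing s with
  | zero =>
    simp only [enum, List.mem_singleton]
    constructor
    · rintro rfl; simp
    · rintro ⟨h, -⟩; exact List.length_eq_zero_iff.mp h
  | succ k ih =>
    simp only [enum, List.mem_flatMap, List.mem_map, PySem.List.mem_pyRange_one]
    constructor
    · rintro ⟨i, ⟨hi0, hi1⟩, a, ha, rfl⟩
      obtain ⟨hl, hb⟩ := ih.mp ha
      refine ⟨by simp [hl], ?_⟩
      intro x hx
      rcases List.mem_cons.mp hx with rfl | hx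
      · exact ⟨hi0, hi1⟩
      · exact hb x hx
    · rintro ⟨hl, hb⟩
      cases s with
      | nil => simp at hl
      | cons i a =>
        refine ⟨i, ⟨(hb i (by simp)).1, (hb i (by simp)).2⟩, a, ?_, rfl⟩
        exact ih.mpr ⟨by simpa using hl, fun x hx => hb x (by simp [hx])⟩

lemma filterMap_singleton {α β : Type} (f : α → Option β) (a : α) :
    List.filterMap f [a] = (f a).toList := by
  cases h : f a <;> simp [h]

lemma ifopt_congr {A B : Prop} [Decidable A] [Decidable B] {v1 v2 : Int} {c1 c2 : List Int}
    (hiff : A ↔ B) (hv : A → v1 = v2 ∧ c1 = c2) :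
    (if A then some (v1, c1) else none) = (if B then some (v2, c2) else none) := by
  by_cases hA : A
  · rw [if_pos hA, if_pos (hiff.mp hA)]
    obtain ⟨h1, h2⟩ := hv hA
    rw [h1, h2]
  · rw [if_neg hA, if_neg (fun hB => hA (hiff.mpr hB))]

lemma checkA_eq (n : Int) (info : List Int) :
    ∀ (k idx : Nat) (cnt : List Int) (res1 res2 : Int), idx + k = 11 → cnt.length = 11 →
    cnt.drop idx = List.replicate k 0 →
    checkA n info idx cnt res1 res2 =
      (enum n k).filterMap (fun s =>
        if (cnt.take idx ++ s).sum = n ∧ res2 + sc2 info idx s < res1 + sc1 info idx s then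
          some (res1 + sc1 info idx s - (res2 + sc2 info idx s), cnt.take idx ++ s)
        else none) := by
  intro k
  induction k with
  | zero =>
    intro idx cnt res1 res2 hik hlen hdrop
    have hidx : idx = 11 := by omega
    subst hidx
    have htake : cnt.take 11 = cnt := by rw [← hlen]; exact List.take_length
    rw [checkA]
    simp only [enum]
    by_cases h1 : cnt.sum > n
    · rw [if_pos h1, List.filterMap_cons_none ?_, List.filterMap_nil]
      rw [List.append_nil, htake, if_neg]
      rintro ⟨he, -⟩
      omega
    · rw [if_neg h1, if_pos trivial]
      by_cases h2 : cnt.sum = n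
      · by_cases h3 : res1 > res2
        · rw [if_pos h2, if_pos h3]
          have hcond : (List.take 11 cnt ++ []).sum = n ∧
              res2 + sc2 info 11 [] < res1 + sc1 info 11 [] := by
            rw [List.append_nil, htake]
            exact ⟨h2, by simp [sc1, sc2]; omega⟩
          rw [filterMap_singleton]
          beta_reduce
          rw [if_pos hcond]
          simp [sc1, sc2, htake]
        · rw [if_pos h2, if_neg h3, List.filterMap_cons_none ?_, List.filterMap_nil]
          rw [List.append_nil, htake, if_neg]
          rintro ⟨-, hlt⟩
          simp [sc1, sc2] at hlt
          omega
      · rw [if_neg h2, List.filterMap_cons_none ?_, List.filterMap_nil]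
        rw [List.append_nil, htake, if_neg]
        rintro ⟨he, -⟩
        exact h2 he
  | succ k ih =>
    intro idx cnt res1 res2 hik hlen hdrop
    have hidxlt : idx < 11 := by omega
    have hsumdrop : cnt.sum = (cnt.take idx).sum := by
      conv_lhs => rw [← List.take_append_drop idx cnt]
      rw [List.sum_append, hdrop, List.sum_replicate]
      simp
    rw [checkA]
    by_cases h1 : cnt.sum > n
    · rw [if_pos h1]
      symm
      rw [List.filterMap_eq_nil_iff]
      intro s hs
      obtain ⟨hslen, hsb⟩ := mem_enum.mp hs
      have hssum : 0 ≤ s.sum := List.sum_nonneg (fun x hx => (hsb x hx).1)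
      rw [if_neg]
      rintro ⟨he, -⟩
      rw [List.sum_append] at he
      omega
    · rw [if_neg h1, if_neg (by omega : ¬ idx = 11), if_neg (by omega : ¬ 11 < idx)]
      simp only [enum]
      rw [List.filterMap_flatMap]
      refine List.flatMap_congr ?_
      intro i hi
      rw [PySem.List.mem_pyRange_one] at hi
      rw [List.filterMap_map]
      have hlen' : (cnt.set idx i).length = 11 := by rw [List.length_set]; exact hlen
      have hdrop' : (cnt.set idx i).drop (idx + 1) = List.replicate k 0 := by
        rw [List.drop_set, if_pos (by omega)]
        have hdd : cnt.drop (idx + 1) = (cnt.drop idx).drop 1 := by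
          rw [List.drop_drop, Nat.add_comm]
        rw [hdd, hdrop]
        rfl
      have htake' : (cnt.set idx i).take (idx + 1) = cnt.take idx ++ [i] := by
        rw [List.set_eq_take_append_cons_drop, if_pos (by omega)]
        have hlt : idx + 1 = (cnt.take idx).length + 1 := by
          rw [List.length_take]
          omega
        rw [hlt, List.take_length_add_append]
        rfl
      by_cases hb1 : i = 0 ∧ (PySem.List.pyGet? info (idx : Int)).getD 0 = 0
      · rw [if_pos hb1, ih (idx + 1) (cnt.set idx i) res1 res2 (by omega) hlen' hdrop']
        refine List.filterMap_congr ?_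
        intro s hs
        simp only [Function.comp_apply]
        beta_reduce
        rw [htake']
        have hg : gi info idx = 0 := hb1.2
        have e1 : sc1 info idx (i :: s) = 0 + sc1 info (idx + 1) s := by
          rw [sc1, if_neg (by rw [hg, hb1.1]; omega)]
        have e2 : sc2 info idx (i :: s) = 0 + sc2 info (idx + 1) s := by
          rw [sc2, if_pos ⟨hb1.1, hg⟩]
        have hs1 : ((cnt.take idx ++ [i]) ++ s).sum = (cnt.take idx ++ i :: s).sum := by
          simp
        refine ifopt_congr (by rw [e1, e2]; constructor <;> rintro ⟨ha, hb⟩ <;>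
          exact ⟨by omega, by omega⟩) (fun hA => ⟨by rw [e1, e2]; omega, by simp⟩)
      · rw [if_neg hb1]
        by_cases hb2 : (PySem.List.pyGet? info (idx : Int)).getD 0 < i
        · rw [if_pos hb2,
            ih (idx + 1) (cnt.set idx i) (res1 + 10 - (idx : Int)) res2 (by omega) hlen' hdrop']
          refine List.filterMap_congr ?_
          intro s hs
          simp only [Function.comp_apply]
          beta_reduce
          rw [htake']
          have hg : gi info idx < i := hb2
          have e1 : sc1 info idx (i :: s) = wt idx + sc1 info (idx + 1) s := by
            rw [sc1, if_pos hg]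
          have hb1' : ¬ (i = 0 ∧ gi info idx = 0) := hb1
          have e2 : sc2 info idx (i :: s) = 0 + sc2 info (idx + 1) s := by
            rw [sc2, if_neg hb1', if_pos hg]
          have hs1 : ((cnt.take idx ++ [i]) ++ s).sum = (cnt.take idx ++ i :: s).sum := by
            simp
          have hwt : wt idx = 10 - (idx : Int) := rfl
          refine ifopt_congr (by rw [e1, e2]; constructor <;> rintro ⟨ha, hb⟩ <;>
            exact ⟨by omega, by rw [hwt] at *; omega⟩)
            (fun hA => ⟨by rw [e1, e2, hwt]; omega, by simp⟩)
        · rw [if_neg hb2,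
            ih (idx + 1) (cnt.set idx i) res1 (res2 + 10 - (idx : Int)) (by omega) hlen' hdrop']
          refine List.filterMap_congr ?_
          intro s hs
          simp only [Function.comp_apply]
          beta_reduce
          rw [htake']
          have hg : ¬ gi info idx < i := hb2
          have e1 : sc1 info idx (i :: s) = 0 + sc1 info (idx + 1) s := by
            rw [sc1, if_neg hg]
          have hb1' : ¬ (i = 0 ∧ gi info idx = 0) := hb1
          have e2 : sc2 info idx (i :: s) = wt idx + sc2 info (idx + 1) s := by
            rw [sc2, if_neg hb1', if_neg hg]
          have hs1 : ((cnt.take idx ++ [i]) ++ s).sum = (cnt.take idx ++ i :: s).sum := by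
            simp
          have hwt : wt idx = 10 - (idx : Int) := rfl
          refine ifopt_congr (by rw [e1, e2]; constructor <;> rintro ⟨ha, hb⟩ <;>
            exact ⟨by omega, by rw [hwt] at *; omega⟩)
            (fun hA => ⟨by rw [e1, e2, hwt]; omega, by simp⟩)

lemma result_eq (n : Int) (info : List Int) :
    checkA n info 0 (List.replicate 11 0) 0 0 =
      (enum n 11).filterMap (fun c =>
        if c.sum = n ∧ sc2 info 0 c < sc1 info 0 c then some (dd info c, c) else none) := by
  rw [checkA_eq n info 11 0 (List.replicate 11 0) 0 0 rfl (by simp) (by simp)]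
  refine List.filterMap_congr ?_
  intro c hc
  simp only [List.take_zero, List.nil_append]
  refine ifopt_congr (by constructor <;> rintro ⟨ha, hb⟩ <;> exact ⟨ha, by omega⟩)
    (fun hA => ⟨by unfold dd; omega, rfl⟩)

-- ---------- bit helpers ----------

lemma bitb_eq_testBit (mask idx : Nat) : bitb mask idx = Nat.testBit mask idx := by
  show ((mask >>> idx) &&& 1 == 1) = (1 &&& (mask >>> idx) != 0)
  rw [Nat.and_one_is_mod, Nat.and_comm, Nat.and_one_is_mod]
  rcases Nat.mod_two_eq_zero_or_one (mask >>> idx) with h | h <;> rw [h] <;> rfl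

lemma exists_mask (f : Nat → Bool) : ∀ k, ∃ m < 2 ^ k, ∀ j < k, Nat.testBit m j = f j := by
  intro k
  induction k with
  | zero => exact ⟨0, by norm_num, by omega⟩
  | succ k ih =>
    obtain ⟨m, hm, hb⟩ := ih
    by_cases hf : f k = true
    · refine ⟨2 ^ k + m, by rw [pow_succ]; omega, ?_⟩
      intro j hj
      rcases Nat.lt_or_ge j k with h | h
      · rw [Nat.testBit_two_pow_add_gt h]; exact hb j h
      · have hjk : j = k := by omega
        subst hjk
        have h1 : (2 ^ j + m).testBit j = !m.testBit j := Nat.testBit_two_pow_add_eq m j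
        rw [h1, Nat.testBit_lt_two_pow hm, hf]; rfl
    · refine ⟨m, lt_trans hm (by rw [pow_succ]; omega), ?_⟩
      intro j hj
      rcases Nat.lt_or_ge j k with h | h
      · exact hb j h
      · have hjk : j = k := by omega
        subst hjk
        rw [Nat.testBit_lt_two_pow hm]
        simp at hf
        exact hf.symm

-- ---------- fillB invariants ----------

lemma fillB_succ_win (info : List Int) (mask : Nat) (k : Nat) (left : Int)
    (hb : bitb mask (10 - k) = true) :
    fillB info mask (k + 1) left =
      ((gi info (10 - k) + 1 + (fillB info mask k left).2) ::
        (fillB info mask k left).1, 0) := by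
  have h10 : 11 - (k + 1) = 10 - k := by omega
  have hb' : mask >>> (10 - k) % 2 = 1 := by
    simp only [bitb] at hb
    simpa [Nat.and_one_is_mod] using hb
  simp [fillB, h10, gi, hb']

lemma fillB_succ_lose (info : List Int) (mask : Nat) (k : Nat) (left : Int)
    (hb : bitb mask (10 - k) = false) :
    fillB info mask (k + 1) left =
      ((min (fillB info mask k left).2 (gi info (10 - k))) :: (fillB info mask k left).1,
        (fillB info mask k left).2 - min (fillB info mask k left).2 (gi info (10 - k))) := by
  have h10 : 11 - (k + 1) = 10 - k := by omega
  have hb' : mask >>> (10 - k) % 2 = 0 := by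
    simp only [bitb] at hb
    simp [Nat.and_one_is_mod] at hb
    omega
  simp [fillB, h10, gi, hb']

lemma fillB_length (info : List Int) (mask : Nat) (k : Nat) (left : Int) :
    (fillB info mask k left).1.length = k := by
  induction k generalizing left with
  | zero => rfl
  | succ k ih =>
    rcases hb : bitb mask (10 - k) with _ | _
    · rw [fillB_succ_lose info mask k left hb]; simp [ih]
    · rw [fillB_succ_win info mask k left hb]; simp [ih]

lemma fillB_snd_bounds (info : List Int) (mask : Nat) (k : Nat) (hk : k ≤ 11) (left : Int)
    (hl : 0 ≤ left) (hinfo : InfoOk info) :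
    0 ≤ (fillB info mask k left).2 ∧ (fillB info mask k left).2 ≤ left := by
  induction k with
  | zero => exact ⟨hl, le_refl _⟩
  | succ k ih =>
    have ih' := ih (by omega)
    rcases hb : bitb mask (10 - k) with _ | _
    · have hg : 0 ≤ gi info (10 - k) := hinfo (10 - k) (by omega)
      rw [fillB_succ_lose info mask k left hb]
      simp only
      omega
    · rw [fillB_succ_win info mask k left hb]
      simp only
      omega

lemma fillB_sum (info : List Int) (mask : Nat) (k : Nat) (left : Int) :
    (fillB info mask k left).1.sum + (fillB info mask k left).2 = left + needS info mask k := by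
  induction k with
  | zero => simp [fillB, needS]
  | succ k ih =>
    rcases hb : bitb mask (10 - k) with _ | _
    · rw [fillB_succ_lose info mask k left hb]
      simp [List.sum_cons, needS, hb]
      omega
    · rw [fillB_succ_win info mask k left hb]
      simp [List.sum_cons, needS, hb]
      omega

lemma fillB_snd_eq_zero (info : List Int) (mask : Nat) (k : Nat) (hk : k ≤ 11) (left : Int)
    (hl : 0 ≤ left) (hinfo : InfoOk info)
    (hw : ∃ idx, 11 - k ≤ idx ∧ idx < 11 ∧ bitb mask idx = true) :
    (fillB info mask k left).2 = 0 := by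
  induction k with
  | zero => obtain ⟨idx, h1, h2, _⟩ := hw; omega
  | succ k ih =>
    rcases hb : bitb mask (10 - k) with _ | _
    · obtain ⟨idx, h1, h2, h3⟩ := hw
      have hidx : 11 - k ≤ idx := by
        by_cases h : idx = 10 - k
        · rw [h] at h3; rw [h3] at hb; cases hb
        · omega
      have hz := ih (by omega) ⟨idx, hidx, h2, h3⟩
      have hg : 0 ≤ gi info (10 - k) := hinfo (10 - k) (by omega)
      rw [fillB_succ_lose info mask k left hb]
      simp only
      omega
    · rw [fillB_succ_win info mask k left hb]

lemma capS_nonneg (info : List Int) (mask : Nat) (hinfo : InfoOk info) :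
    ∀ (k : Nat), k ≤ 11 → 0 ≤ capS info mask k := by
  intro k
  induction k with
  | zero => intro _; simp [capS]
  | succ k ih =>
    intro hk
    have h1 := hinfo (10 - k) (by omega)
    have h2 := ih (by omega)
    simp [capS]
    omega

lemma fillB_nowin (info : List Int) (mask : Nat) (k : Nat) (hk : k ≤ 11) (left : Int)
    (hl : 0 ≤ left) (hinfo : InfoOk info)
    (hw : ∀ idx, 11 - k ≤ idx → idx < 11 → bitb mask idx = false) :
    (fillB info mask k left).1.sum = min left (capS info mask k) ∧
      (fillB info mask k left).2 = max (left - capS info mask k) 0 := by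
  induction k with
  | zero => simp [fillB, capS]; omega
  | succ k ih =>
    have hw' : ∀ idx, 11 - k ≤ idx → idx < 11 → bitb mask idx = false :=
      fun i a b => hw i (by omega) b
    obtain ⟨ih1, ih2⟩ := ih (by omega) hw'
    have hb : bitb mask (10 - k) = false := hw (10 - k) (by omega) (by omega)
    have hg : 0 ≤ gi info (10 - k) := hinfo (10 - k) (by omega)
    have hcap : 0 ≤ capS info mask k := capS_nonneg info mask hinfo k (by omega)
    rw [fillB_succ_lose info mask k left hb]
    simp only [List.sum_cons, capS]
    constructor <;> omega

lemma fillB_entries (info : List Int) (mask : Nat) (k : Nat) (hk : k ≤ 11) (left : Int)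
    (hl : 0 ≤ left) (hinfo : InfoOk info) :
    ∀ j < k,
      (bitb mask (11 - k + j) = true →
        gi info (11 - k + j) + 1 ≤ ((fillB info mask k left).1.getD j 0)) ∧
      (bitb mask (11 - k + j) = false →
        0 ≤ ((fillB info mask k left).1.getD j 0) ∧
          ((fillB info mask k left).1.getD j 0) ≤ gi info (11 - k + j)) := by
  induction k with
  | zero => omega
  | succ k ih =>
    intro j hj
    have h10 : 11 - (k + 1) = 10 - k := by omega
    have hsnd := fillB_snd_bounds info mask k (by omega) left hl hinfo
    rcases hb : bitb mask (10 - k) with _ | _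
    · rw [fillB_succ_lose info mask k left hb]
      cases j with
      | zero =>
        simp only [Nat.add_zero, h10, List.getD_cons_zero]
        constructor
        · intro h; rw [h] at hb; cases hb
        · intro _
          have hg : 0 ≤ gi info (10 - k) := hinfo (10 - k) (by omega)
          omega
      | succ j =>
        have hpos : 11 - (k + 1) + (j + 1) = 11 - k + j := by omega
        simp only [List.getD_cons_succ, hpos]
        exact ih (by omega) j (by omega)
    · rw [fillB_succ_win info mask k left hb]
      cases j with
      | zero =>
        simp only [Nat.add_zero, h10, List.getD_cons_zero]
        constructor
        · intro _; omega
        · intro h; rw [h] at hb; cases hb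
      | succ j =>
        have hpos : 11 - (k + 1) + (j + 1) = 11 - k + j := by omega
        simp only [List.getD_cons_succ, hpos]
        exact ih (by omega) j (by omega)

lemma list_sum_le_cap (info : List Int) (mask : Nat) :
    ∀ (k : Nat), k ≤ 11 → ∀ (t : List Int), t.length = k →
    (∀ j, j < k → t.getD j 0 ≤ gi info (11 - k + j)) →
    t.sum ≤ capS info mask k := by
  intro k
  induction k with
  | zero =>
    intro _ t ht _
    rw [List.length_eq_zero_iff.mp ht]
    simp [capS]
  | succ k ih =>
    intro hk t ht hb
    cases t with
    | nil => simp at ht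
    | cons a t =>
      have h10 : 11 - (k + 1) = 10 - k := by omega
      have h1 : a ≤ gi info (10 - k) := by
        have := hb 0 (by omega)
        simpa [h10] using this
      have h2 : t.sum ≤ capS info mask k := by
        refine ih (by omega) t (by simpa using ht) ?_
        intro j hj
        have := hb (j + 1) (by omega)
        have hpos : 10 - k + (j + 1) = 11 - k + j := by omega
        simpa [hpos] using this
      simp only [List.sum_cons, capS]
      omega

lemma fillB_lexmin (info : List Int) (mask : Nat) (hinfo : InfoOk info) :
    ∀ (k : Nat), k ≤ 11 → ∀ (left : Int), 0 ≤ left →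
    ∀ (t : List Int), t.length = k →
    (∀ j, j < k →
      (bitb mask (11 - k + j) = true → gi info (11 - k + j) + 1 ≤ t.getD j 0) ∧
      (bitb mask (11 - k + j) = false → 0 ≤ t.getD j 0 ∧ t.getD j 0 ≤ gi info (11 - k + j))) →
    t.sum = (fillB info mask k left).1.sum →
    (fillB info mask k left).1 = t ∨ (fillB info mask k left).1 < t := by
  intro k
  induction k with
  | zero =>
    intro _ left _ t ht _ _
    rw [List.length_eq_zero_iff.mp ht]
    exact Or.inl rfl
  | succ k ih =>
    intro hk left hl t ht hcon hsum
    cases t with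
    | nil => simp at ht
    | cons a t =>
      have h10 : 11 - (k + 1) = 10 - k := by omega
      have hsnd := fillB_snd_bounds info mask k (by omega) left hl hinfo
      have ha0 := hcon 0 (by omega)
      simp only [Nat.add_zero, List.getD_cons_zero, h10] at ha0
      have hcon' : ∀ j, j < k →
          (bitb mask (11 - k + j) = true → gi info (11 - k + j) + 1 ≤ t.getD j 0) ∧
          (bitb mask (11 - k + j) = false →
            0 ≤ t.getD j 0 ∧ t.getD j 0 ≤ gi info (11 - k + j)) := by
        intro j hj
        have := hcon (j + 1) (by omega)
        have hpos : 11 - (k + 1) + (j + 1) = 11 - k + j := by omega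
        rwa [hpos, List.getD_cons_succ] at this
      rcases hb : bitb mask (10 - k) with _ | _
      · -- head target not won
        have hg : 0 ≤ gi info (10 - k) := hinfo (10 - k) (by omega)
        have hbase := ha0.2 hb
        rw [fillB_succ_lose info mask k left hb] at hsum ⊢
        simp only [List.sum_cons] at hsum
        have hhead : min (fillB info mask k left).2 (gi info (10 - k)) ≤ a := by
          by_cases hwin : ∃ idx, 11 - k ≤ idx ∧ idx < 11 ∧ bitb mask idx = true
          · have hz := fillB_snd_eq_zero info mask k (by omega) left hl hinfo hwin
            omega
          · push_neg at hwin
            have hw' : ∀ idx, 11 - k ≤ idx → idx < 11 → bitb mask idx = false := by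
              intro i p q
              rcases hfb : bitb mask i with _ | _
              · rfl
              · exact absurd hfb (by simpa using hwin i p q)
            obtain ⟨hns, hnl⟩ := fillB_nowin info mask k (by omega) left hl hinfo hw'
            have htcap : t.sum ≤ capS info mask k := by
              refine list_sum_le_cap info mask k (by omega) t (by simpa using ht) ?_
              intro j hj
              exact ((hcon' j hj).2 (hw' _ (by omega) (by omega))).2
            omega
        rcases lt_or_eq_of_le hhead with hlt | heq
        · exact Or.inr (List.cons_lt_cons_iff.mpr (Or.inl hlt))
        · have hteq : t.sum = (fillB info mask k left).1.sum := by omega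
          rcases ih (by omega) left hl t (by simpa using ht) hcon' hteq with h | h
          · exact Or.inl (by rw [heq, h])
          · exact Or.inr (List.cons_lt_cons_iff.mpr (Or.inr ⟨heq, h⟩))
      · -- head target won
        have hbase := ha0.1 hb
        rw [fillB_succ_win info mask k left hb] at hsum ⊢
        simp only [List.sum_cons] at hsum
        have hhead : gi info (10 - k) + 1 + (fillB info mask k left).2 ≤ a := by
          by_cases hwin : ∃ idx, 11 - k ≤ idx ∧ idx < 11 ∧ bitb mask idx = true
          · have hz := fillB_snd_eq_zero info mask k (by omega) left hl hinfo hwin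
            omega
          · push_neg at hwin
            have hw' : ∀ idx, 11 - k ≤ idx → idx < 11 → bitb mask idx = false := by
              intro i p q
              rcases hfb : bitb mask i with _ | _
              · rfl
              · exact absurd hfb (by simpa using hwin i p q)
            obtain ⟨hns, hnl⟩ := fillB_nowin info mask k (by omega) left hl hinfo hw'
            have htcap : t.sum ≤ capS info mask k := by
              refine list_sum_le_cap info mask k (by omega) t (by simpa using ht) ?_
              intro j hj
              exact ((hcon' j hj).2 (hw' _ (by omega) (by omega))).2
            omega
        rcases lt_or_eq_of_le hhead with hlt | heq
        · exact Or.inr (List.cons_lt_cons_iff.mpr (Or.inl hlt))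
        · have hteq : t.sum = (fillB info mask k left).1.sum := by omega
          rcases ih (by omega) left hl t (by simpa using ht) hcon' hteq with h | h
          · exact Or.inl (by rw [heq, h])
          · exact Or.inr (List.cons_lt_cons_iff.mpr (Or.inr ⟨heq, h⟩))

-- ---------- stepB characterization and fold invariant ----------

lemma sum_map_sub (l : List Nat) (f g : Nat → Int) :
    (l.map f).sum - (l.map g).sum = (l.map (fun x => f x - g x)).sum := by
  induction l with
  | nil => simp
  | cons a t ih => simp only [List.map_cons, List.sum_cons]; omega

lemma diff_eq (info : List Int) (mask : Nat) :
    ((((List.range 11).filter (fun (idx : Nat) => (mask >>> idx) &&& 1 == 1)).map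
        (fun (idx : Nat) => (10 : Int) - (idx : Int))).sum
      - ((((List.range 11).filter (fun (idx : Nat) => !((mask >>> idx) &&& 1 == 1))).filter
          (fun (idx : Nat) => decide (0 < (PySem.List.pyGet? info (idx : Int)).getD 0))).map
        (fun (idx : Nat) => (10 : Int) - (idx : Int))).sum) = dM info mask := by
  rw [List.filter_filter, sum_filter_map, sum_filter_map, sum_map_sub, dM]
  refine congrArg List.sum (List.map_congr_left ?_)
  intro idx _
  rcases hb : bitb mask idx with _ | _
  · have hb' : mask >>> idx % 2 = 0 := by
      simp only [bitb] at hb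
      simp [Nat.and_one_is_mod] at hb
      omega
    by_cases hg : 0 < gi info idx <;>
      simp [hb, hb', gi, wt, hg] <;> try omega
  · have hb' : mask >>> idx % 2 = 1 := by
      simp only [bitb] at hb
      simpa [Nat.and_one_is_mod] using hb
    by_cases hg : 0 < gi info idx <;>
      simp [hb, hb', gi, wt, hg] <;> try omega

lemma needed_eq (info : List Int) (mask : Nat) :
    ((((List.range 11).filter (fun (idx : Nat) => (mask >>> idx) &&& 1 == 1)).map
        (fun (idx : Nat) => (PySem.List.pyGet? info (idx : Int)).getD 0 + 1)).sum)
      = needM info mask := by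
  rw [sum_filter_map, needM]
  refine congrArg List.sum (List.map_congr_left ?_)
  intro idx _
  rcases hb : bitb mask idx with _ | _
  · have hb' : mask >>> idx % 2 = 0 := by
      simp only [bitb] at hb
      simp [Nat.and_one_is_mod] at hb
      omega
    simp [hb, hb', gi]
  · have hb' : mask >>> idx % 2 = 1 := by
      simp only [bitb] at hb
      simpa [Nat.and_one_is_mod] using hb
    simp [hb, hb', gi]

lemma stepB_not_qual (n : Int) (info : List Int) (best : Option (Int × List Int)) (mask : Nat)
    (h : ¬ Qual n info mask) : stepB n info best mask = best := by
  simp only [stepB]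
  rw [diff_eq, needed_eq]
  have hcond : dM info mask ≤ 0 ∨ needM info mask > n := by
    by_contra hc
    push_neg at hc
    exact h ⟨by omega, by omega⟩
  rw [if_pos hcond]

lemma stepB_qual_none (n : Int) (info : List Int) (mask : Nat) (h : Qual n info mask) :
    stepB n info none mask = some (cand n info mask) := by
  obtain ⟨h2, h3⟩ := h
  simp only [stepB]
  rw [diff_eq, needed_eq, if_neg (by omega)]
  rfl

lemma stepB_qual_some (n : Int) (info : List Int) (b : Int × List Int) (mask : Nat)
    (h : Qual n info mask) :
    (Better (cand n info mask) b ∧ stepB n info (some b) mask = some (cand n info mask)) ∨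
    (¬ Better (cand n info mask) b ∧ stepB n info (some b) mask = some b) := by
  obtain ⟨h2, h3⟩ := h
  have hstep : stepB n info (some b) mask =
      if b.1 < dM info mask ∨ (dM info mask = b.1 ∧ (fillB info mask 11 (n - needM info mask)).1 < b.2)
      then some (dM info mask, (fillB info mask 11 (n - needM info mask)).1) else some b := by
    simp only [stepB]
    rw [diff_eq, needed_eq, if_neg (by omega)]
  by_cases hbB : Better (cand n info mask) b
  · refine Or.inl ⟨hbB, ?_⟩
    have hbB' : b.1 < dM info mask ∨
        (dM info mask = b.1 ∧ (fillB info mask 11 (n - needM info mask)).1 < b.2) := by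
      simpa [cand, Better] using hbB
    rw [hstep, if_pos hbB']
    rfl
  · refine Or.inr ⟨hbB, ?_⟩
    have hbB' : ¬ (b.1 < dM info mask ∨
        (dM info mask = b.1 ∧ (fillB info mask 11 (n - needM info mask)).1 < b.2)) := by
      intro hc
      exact hbB (by simpa [cand, Better] using hc)
    rw [hstep, if_neg hbB']

lemma better_irrefl (x : Int × List Int) : ¬ Better x x := by
  rintro (h | ⟨-, h⟩)
  · omega
  · exact lt_irrefl _ h

def IsOpt (n : Int) (info : List Int) (L : List Nat) (r : Option (Int × List Int)) : Prop :=
  (r = none → ∀ m ∈ L, ¬ Qual n info m) ∧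
  (∀ p, r = some p →
    (∃ m ∈ L, Qual n info m ∧ cand n info m = p) ∧
    (∀ m ∈ L, Qual n info m → ¬ Better (cand n info m) p))

lemma foldl_stepB_opt_aux (n : Int) (info : List Int) :
    ∀ (L : List Nat) (r : Option (Int × List Int)) (L0 : List Nat), IsOpt n info L0 r →
    IsOpt n info (L0 ++ L) (L.foldl (stepB n info) r) := by
  intro L
  induction L with
  | nil => intro r L0 h; simpa using h
  | cons m L ih =>
    intro r L0 h
    have key : IsOpt n info (L0 ++ [m]) (stepB n info r m) := by
      by_cases hq : Qual n info m
      · cases r with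
        | none =>
          rw [stepB_qual_none n info m hq]
          constructor
          · intro hc; cases hc
          · intro p hp
            rw [Option.some.injEq] at hp
            subst hp
            constructor
            · exact ⟨m, by simp, hq, rfl⟩
            · intro m' hm' hq'
              rcases List.mem_append.mp hm' with hm' | hm'
              · exact absurd hq' (h.1 rfl m' hm')
              · rw [List.mem_singleton] at hm'
                subst hm'
                exact better_irrefl _
        | some b =>
          rcases stepB_qual_some n info b m hq with ⟨hbB, heq⟩ | ⟨hbB, heq⟩
          · rw [heq]
            constructor
            · intro hc; cases hc
            · intro p hp
              rw [Option.some.injEq] at hp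
              subst hp
              constructor
              · exact ⟨m, by simp, hq, rfl⟩
              · intro m' hm' hq'
                rcases List.mem_append.mp hm' with hm' | hm'
                · intro hcon
                  exact (h.2 b rfl).2 m' hm' hq' (better_trans hcon hbB)
                · rw [List.mem_singleton] at hm'
                  subst hm'
                  exact better_irrefl _
          · rw [heq]
            constructor
            · intro hc; cases hc
            · intro p hp
              rw [Option.some.injEq] at hp
              subst hp
              obtain ⟨⟨m0, hm0, hq0, he0⟩, hall⟩ := h.2 b rfl
              constructor
              · exact ⟨m0, List.mem_append.mpr (Or.inl hm0), hq0, he0⟩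
              · intro m' hm' hq'
                rcases List.mem_append.mp hm' with hm' | hm'
                · exact hall m' hm' hq'
                · rw [List.mem_singleton] at hm'
                  subst hm'
                  exact hbB
      · rw [stepB_not_qual n info r m hq]
        constructor
        · intro hr m' hm'
          rcases List.mem_append.mp hm' with hm' | hm'
          · exact h.1 hr m' hm'
          · rw [List.mem_singleton] at hm'
            subst hm'
            exact hq
        · intro p hp
          obtain ⟨⟨m0, hm0, hq0, he0⟩, hall⟩ := h.2 p hp
          constructor
          · exact ⟨m0, List.mem_append.mpr (Or.inl hm0), hq0, he0⟩
          · intro m' hm' hq'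
            rcases List.mem_append.mp hm' with hm' | hm'
            · exact hall m' hm' hq'
            · rw [List.mem_singleton] at hm'
              subst hm'
              exact absurd hq' hq
    have := ih (stepB n info r m) (L0 ++ [m]) key
    simpa [List.append_assoc] using this

lemma foldl_stepB_opt (n : Int) (info : List Int) (L : List Nat) :
    IsOpt n info L (L.foldl (stepB n info) none) := by
  have h0 : IsOpt n info [] none := by
    constructor
    · intro _ m hm; cases hm
    · intro p hp; cases hp
  simpa using foldl_stepB_opt_aux n info L none [] h0

-- ---------- bridging mask candidates and assignments ----------

lemma sc1_eq_sum (info : List Int) :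
    ∀ (s : List Int) (idx : Nat), sc1 info idx s =
      ((List.range s.length).map
        (fun j => if gi info (idx + j) < s.getD j 0 then wt (idx + j) else 0)).sum := by
  intro s
  induction s with
  | nil => intro idx; simp [sc1]
  | cons a t ih =>
    intro idx
    rw [sc1, ih (idx + 1)]
    rw [List.length_cons, List.range_succ_eq_map, List.map_cons, List.map_map, List.sum_cons]
    congr 1
    refine congrArg List.sum (List.map_congr_left ?_)
    intro j _
    simp only [Function.comp_apply, Nat.succ_eq_add_one, List.getD_cons_succ]
    have h : idx + (j + 1) = idx + 1 + j := by omega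
    rw [h]

lemma sc2_eq_sum (info : List Int) :
    ∀ (s : List Int) (idx : Nat), sc2 info idx s =
      ((List.range s.length).map
        (fun j => if s.getD j 0 = 0 ∧ gi info (idx + j) = 0 then 0
          else if gi info (idx + j) < s.getD j 0 then 0 else wt (idx + j))).sum := by
  intro s
  induction s with
  | nil => intro idx; simp [sc2]
  | cons a t ih =>
    intro idx
    rw [sc2, ih (idx + 1)]
    rw [List.length_cons, List.range_succ_eq_map, List.map_cons, List.map_map, List.sum_cons]
    congr 1
    refine congrArg List.sum (List.map_congr_left ?_)
    intro j _
    simp only [Function.comp_apply, Nat.succ_eq_add_one, List.getD_cons_succ]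
    have h : idx + (j + 1) = idx + 1 + j := by omega
    rw [h]

lemma needS_eq_sum (info : List Int) (mask : Nat) :
    ∀ (k : Nat), k ≤ 11 → needS info mask k =
      ((List.range k).map
        (fun j => if bitb mask (11 - k + j) then gi info (11 - k + j) + 1 else 0)).sum := by
  intro k
  induction k with
  | zero => intro _; simp [needS]
  | succ k ih =>
    intro hk
    rw [needS, ih (by omega)]
    rw [List.range_succ_eq_map, List.map_cons, List.map_map, List.sum_cons]
    have h0 : 11 - (k + 1) + 0 = 10 - k := by omega
    rw [h0]
    congr 1
    refine congrArg List.sum (List.map_congr_left ?_)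
    intro j _
    simp only [Function.comp_apply, Nat.succ_eq_add_one]
    have h : 11 - (k + 1) + (j + 1) = 11 - k + j := by omega
    rw [h]

lemma needS_eq_needM (info : List Int) (mask : Nat) :
    needS info mask 11 = needM info mask := by
  rw [needS_eq_sum info mask 11 (le_refl _), needM]
  refine congrArg List.sum (List.map_congr_left ?_)
  intro j hj
  have h : 11 - 11 + j = j := by omega
  rw [h]

lemma dM_pos_has_win (info : List Int) (mask : Nat) (h : 0 < dM info mask) :
    ∃ idx, idx < 11 ∧ bitb mask idx = true := by
  by_contra hc
  push_neg at hc
  have hall : ∀ idx ∈ List.range 11, bitb mask idx = false := by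
    intro idx hidx
    rw [List.mem_range] at hidx
    rcases hb : bitb mask idx with _ | _
    · rfl
    · exact absurd hb (by simpa using hc idx hidx)
  have hle : dM info mask ≤ 0 := by
    rw [dM]
    calc ((List.range 11).map
        (fun idx => if bitb mask idx then wt idx else if 0 < gi info idx then -(wt idx) else 0)).sum
        ≤ ((List.range 11).map (fun _ => (0 : Int))).sum := by
          refine List.sum_le_sum ?_
          intro idx hidx
          rw [hall idx hidx]
          have hwt : 0 ≤ wt idx := by
            rw [List.mem_range] at hidx
            unfold wt
            omega
          by_cases hg : 0 < gi info idx <;> simp [hg] <;> omega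
      _ = 0 := by simp
  omega

lemma dM_eq_dd (n : Int) (info : List Int) (mask : Nat) (c : List Int) (hlen : c.length = 11)
    (hpos : ∀ x ∈ c, 0 ≤ x)
    (hwin : ∀ idx < 11, bitb mask idx = decide (gi info idx < c.getD idx 0)) :
    dM info mask = dd info c := by
  have hposD : ∀ j, j < 11 → 0 ≤ c.getD j 0 := by
    intro j hj
    rw [List.getD_eq_getElem c 0 (by omega)]
    exact hpos _ (List.getElem_mem _)
  rw [dd, sc1_eq_sum, sc2_eq_sum, hlen, sum_map_sub, dM]
  refine congrArg List.sum (List.map_congr_left ?_)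
  intro j hj
  rw [List.mem_range] at hj
  have hw := hwin j hj
  have hp := hposD j hj
  simp only [Nat.zero_add]
  try simp only [← List.getD_eq_getElem?_getD]
  by_cases hlt : gi info j < c.getD j 0
  · rw [hw, decide_eq_true hlt]
    have h0 : ¬ (c.getD j 0 = 0 ∧ gi info j = 0) := by rintro ⟨h1, h2⟩; omega
    rw [if_pos rfl, if_pos hlt, if_neg h0, if_pos hlt]
    omega
  · rw [hw, decide_eq_false hlt, if_neg (by simp : ¬ (false = true)), if_neg hlt]
    by_cases hg : 0 < gi info j
    · have h0 : ¬ (c.getD j 0 = 0 ∧ gi info j = 0) := by rintro ⟨h1, h2⟩; omega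
      rw [if_pos hg, if_neg h0, if_neg hlt]
      omega
    · have h0 : c.getD j 0 = 0 ∧ gi info j = 0 := ⟨by omega, by omega⟩
      rw [if_neg hg, if_pos h0]
      omega

lemma fill_sum_n (n : Int) (info : List Int) (mask : Nat) (hinfo : InfoOk info)
    (hq : Qual n info mask) :
    (fillB info mask 11 (n - needM info mask)).1.sum = n := by
  obtain ⟨hd, hn⟩ := hq
  obtain ⟨w, hw1, hw2⟩ := dM_pos_has_win info mask hd
  have hz := fillB_snd_eq_zero info mask 11 (le_refl _) (n - needM info mask) (by omega) hinfo
    ⟨w, by omega, hw1, hw2⟩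
  have hs := fillB_sum info mask 11 (n - needM info mask)
  rw [needS_eq_needM] at hs
  omega

lemma fill_winset (n : Int) (info : List Int) (mask : Nat) (hinfo : InfoOk info)
    (hq : Qual n info mask) :
    ∀ idx < 11, bitb mask idx =
      decide (gi info idx < (fillB info mask 11 (n - needM info mask)).1.getD idx 0) := by
  obtain ⟨hd, hn⟩ := hq
  intro idx hidx
  have he := fillB_entries info mask 11 (le_refl _) (n - needM info mask) (by omega) hinfo
    idx hidx
  have h0 : 11 - 11 + idx = idx := by omega
  rw [h0] at he
  rcases hb : bitb mask idx with _ | _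
  · have := (he.2 hb).2
    symm
    rw [decide_eq_false_iff_not]
    omega
  · have := he.1 hb
    symm
    rw [decide_eq_true_eq]
    omega

lemma fill_entries_nonneg (n : Int) (info : List Int) (mask : Nat) (hinfo : InfoOk info)
    (hq : Qual n info mask) :
    ∀ x ∈ (fillB info mask 11 (n - needM info mask)).1, 0 ≤ x := by
  obtain ⟨hd, hn⟩ := hq
  intro x hx
  have hlen := fillB_length info mask 11 (n - needM info mask)
  obtain ⟨j, hj, hxj⟩ := List.mem_iff_getElem.mp hx
  rw [hlen] at hj
  have he := fillB_entries info mask 11 (le_refl _) (n - needM info mask) (by omega) hinfo j hj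
  have h0 : 11 - 11 + j = j := by omega
  rw [h0] at he
  have hgd : (fillB info mask 11 (n - needM info mask)).1.getD j 0 = x := by
    rw [List.getD_eq_getElem _ 0 (by rw [hlen]; omega)]
    exact hxj
  rcases hb : bitb mask j with _ | _
  · have := (he.2 hb).1
    omega
  · have := he.1 hb
    have hg := hinfo j hj
    omega

lemma qual_cand_good (n : Int) (info : List Int) (mask : Nat) (hinfo : InfoOk info)
    (hq : Qual n info mask) :
    (cand n info mask).2 ∈ enum n 11 ∧ Pgood n info (cand n info mask).2 ∧
      dd info (cand n info mask).2 = (cand n info mask).1 := by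
  have hsum := fill_sum_n n info mask hinfo hq
  have hpos := fill_entries_nonneg n info mask hinfo hq
  have hlen := fillB_length info mask 11 (n - needM info mask)
  have hdd : dM info mask = dd info (fillB info mask 11 (n - needM info mask)).1 :=
    dM_eq_dd n info mask _ hlen hpos (fill_winset n info mask hinfo hq)
  obtain ⟨hd, hnM⟩ := hq
  simp only [show (cand n info mask).2 = (fillB info mask 11 (n - needM info mask)).1 from rfl,
    show (cand n info mask).1 = dM info mask from rfl]
  refine ⟨?_, ⟨hsum, ?_⟩, ?_⟩
  · rw [mem_enum]
    refine ⟨hlen, ?_⟩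
    intro x hx
    refine ⟨hpos x hx, ?_⟩
    have := sum_nonneg_mem_le _ hpos x hx
    omega
  · have : 0 < dd info (fillB info mask 11 (n - needM info mask)).1 := by omega
    unfold dd at this
    omega
  · exact hdd.symm

lemma good_has_mask (n : Int) (info : List Int) (c : List Int) (hinfo : InfoOk info)
    (hc : c ∈ enum n 11) (hg : Pgood n info c) :
    ∃ mask < 2048, Qual n info mask ∧ (cand n info mask).1 = dd info c ∧
      ((cand n info mask).2 = c ∨ (cand n info mask).2 < c) := by
  obtain ⟨hlen, hb⟩ := mem_enum.mp hc
  have hposD : ∀ j, j < 11 → 0 ≤ c.getD j 0 := by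
    intro j hj
    rw [List.getD_eq_getElem c 0 (by omega)]
    exact (hb _ (List.getElem_mem _)).1
  obtain ⟨mask, hm, hbits⟩ := exists_mask (fun j => decide (gi info j < c.getD j 0)) 11
  have hwin : ∀ idx < 11, bitb mask idx = decide (gi info idx < c.getD idx 0) := by
    intro idx hidx
    rw [bitb_eq_testBit]
    exact hbits idx hidx
  have hdd : dM info mask = dd info c :=
    dM_eq_dd n info mask c hlen (fun x hx => (hb x hx).1) hwin
  have hdpos : 0 < dM info mask := by
    rw [hdd]
    obtain ⟨-, hsc⟩ := hg
    unfold dd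
    omega
  have hcsum : c.sum = ((List.range 11).map (fun j => c.getD j 0)).sum := by
    rw [sum_eq_range_sum c, hlen]
  have hneed : needM info mask ≤ n := by
    have hle : needM info mask ≤ c.sum := by
      rw [hcsum, needM]
      refine List.sum_le_sum ?_
      intro j hj
      rw [List.mem_range] at hj
      rcases hbj : bitb mask j with _ | _
      · simp only [Bool.false_eq_true, if_false]
        exact hposD j hj
      · rw [hwin j hj] at hbj
        rw [decide_eq_true_eq] at hbj
        simp only [if_true]
        omega
    obtain ⟨hsum, -⟩ := hg
    omega
  have hq : Qual n info mask := ⟨hdpos, hneed⟩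
  refine ⟨mask, by omega, hq, by rw [show (cand n info mask).1 = dM info mask from rfl, hdd], ?_⟩
  have hcon : ∀ j, j < 11 →
      (bitb mask (11 - 11 + j) = true → gi info (11 - 11 + j) + 1 ≤ c.getD j 0) ∧
      (bitb mask (11 - 11 + j) = false →
        0 ≤ c.getD j 0 ∧ c.getD j 0 ≤ gi info (11 - 11 + j)) := by
    intro j hj
    have h0 : 11 - 11 + j = j := by omega
    rw [h0]
    constructor
    · intro hbj
      rw [hwin j hj, decide_eq_true_eq] at hbj
      omega
    · intro hbj
      rw [hwin j hj, decide_eq_false_iff_not] at hbj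
      have := hposD j hj
      omega
  have hsumeq : c.sum = (fillB info mask 11 (n - needM info mask)).1.sum := by
    rw [fill_sum_n n info mask hinfo hq]
    exact hg.1
  exact fillB_lexmin info mask hinfo 11 (le_refl _) (n - needM info mask) (by omega) c hlen
    hcon hsumeq

lemma needM_pos (info : List Int) (mask : Nat) (hinfo : InfoOk info)
    (w : Nat) (hw : w < 11) (hb : bitb mask w = true) : 1 ≤ needM info mask := by
  have hnn : ∀ x ∈ (List.range 11).map
      (fun idx => if bitb mask idx then gi info idx + 1 else 0), 0 ≤ x := by
    intro x hx
    obtain ⟨idx, hidx, rfl⟩ := List.mem_map.mp hx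
    rw [List.mem_range] at hidx
    have := hinfo idx hidx
    by_cases h : bitb mask idx <;> simp [h] <;> omega
  have hmem : gi info w + 1 ∈ (List.range 11).map
      (fun idx => if bitb mask idx then gi info idx + 1 else 0) := by
    refine List.mem_map.mpr ⟨w, List.mem_range.mpr hw, ?_⟩
    rw [hb]
    simp
  have hle := sum_nonneg_mem_le _ hnn _ hmem
  have := hinfo w hw
  unfold needM
  omega

lemma checkA_nil_of_nonpos (n : Int) (info : List Int) (hinfo : InfoOk info) (hn : n ≤ 0) :
    checkA n info 0 (List.replicate 11 0) 0 0 = [] := by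
  rw [result_eq, List.filterMap_eq_nil_iff]
  intro c hc
  rw [if_neg]
  rintro ⟨h1, h2⟩
  obtain ⟨mask, hm, ⟨hd, hneed⟩, -, -⟩ := good_has_mask n info c hinfo hc ⟨h1, h2⟩
  obtain ⟨w, hw, hbw⟩ := dM_pos_has_win info mask hd
  have := needM_pos info mask hinfo w hw hbw
  omega

lemma solution_main (n : Int) (info : List Int) (hinfo : InfoOk info) :
    solution n info = solution_alt n info := by
  by_cases hn : n ≤ 0
  · unfold solution solution_alt
    rw [checkA_nil_of_nonpos n info hinfo hn]
    simp [hn]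
  · have hopt := foldl_stepB_opt n info (List.range 2048)
    unfold solution solution_alt
    rw [if_neg hn]
    cases hfold : (List.range 2048).foldl (stepB n info) none with
    | none =>
      have hnoq := hopt.1 hfold
      have hRnil : checkA n info 0 (List.replicate 11 0) 0 0 = [] := by
        rw [result_eq, List.filterMap_eq_nil_iff]
        intro c hc
        rw [if_neg]
        rintro ⟨h1, h2⟩
        obtain ⟨mask, hm, hq, -, -⟩ := good_has_mask n info c hinfo hc ⟨h1, h2⟩
        exact hnoq mask (List.mem_range.mpr hm) hq
      simp only [hRnil, if_true]
    | some p =>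
      obtain ⟨⟨m0, hm0, hq0, he0⟩, hall⟩ := hopt.2 p hfold
      obtain ⟨henum, hPg, hdd⟩ := qual_cand_good n info m0 hinfo hq0
      have hpR : p ∈ checkA n info 0 (List.replicate 11 0) 0 0 := by
        rw [result_eq, List.mem_filterMap]
        refine ⟨(cand n info m0).2, henum, ?_⟩
        rw [if_pos ⟨hPg.1, hPg.2⟩, hdd, ← he0]
      have hRne : checkA n info 0 (List.replicate 11 0) 0 0 ≠ [] := by
        intro hcon
        rw [hcon] at hpR
        cases hpR
      have hmin : ∀ y ∈ checkA n info 0 (List.replicate 11 0) 0 0, ¬ Better y p := by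
        intro y hy
        rw [result_eq, List.mem_filterMap] at hy
        obtain ⟨c, hc, hfc⟩ := hy
        by_cases hcond : c.sum = n ∧ sc2 info 0 c < sc1 info 0 c
        · rw [if_pos hcond, Option.some.injEq] at hfc
          subst hfc
          obtain ⟨mask, hmlt, hq, hc1, hc2⟩ := good_has_mask n info c hinfo hc hcond
          exact not_better_of_le_of_not hc1 hc2 (hall mask (List.mem_range.mpr hmlt) hq)
        · rw [if_neg hcond] at hfc
          cases hfc
      obtain ⟨m, t, hsorted, hmem, hminA⟩ :=
        head_sorted2_min (checkA n info 0 (List.replicate 11 0) 0 0) hRne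
      have hpm : p = m := by
        rcases hminA p hpR with h | h
        · exact h
        · exact better_total h (hmin m hmem)
      simp only [if_neg hRne, hsorted, List.headD_cons, hpm]

lemma infoOk_of_shape (info : List Int) (hlen : 11 ≤ info.length)
    (hnn : ∀ x ∈ info.take 11, 0 ≤ x) : InfoOk info := by
  intro idx hidx
  have hlt : idx < info.length := by omega
  have : gi info idx = info[idx] := by
    unfold gi
    rw [PySem.List.pyGet?_natCast, List.getElem?_eq_getElem hlt]
    rfl
  rw [this]
  have hmem : info[idx] ∈ info.take 11 := by
    have h1 : idx < (info.take 11).length := by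
      rw [List.length_take]
      omega
    have h2 : (info.take 11)[idx] = info[idx] := List.getElem_take
    rw [← h2]
    exact List.getElem_mem h1
  exact hnn _ hmem

-- ===== VERDICT (by name: the statement is the Claim_ definition above) =====
theorem solution_spec : Claim_equal_solution := by
  intro n info hdom hpre
  rcases hpre with hn | ⟨hlen, hnn⟩
  · show solution n info = solution_alt n info
    unfold solution solution_alt
    have hA : checkA n info 0 (List.replicate 11 0) 0 0 = [] := by
      rw [checkA]
      rw [if_pos (by simp; omega)]
    rw [hA]
    simp [show n ≤ 0 by omega]
  · exact solution_main n info (infoOk_of_shape info hlen hnn)
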